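-- pv_equiv track=rewrite | github.com/makkine/expletive-infixation | infix.py | split_onset
-- ===== SOURCE A (Python) =====
-- def split_onset(word, stress, vidx, infix):
-- 	onsets = ["sh", "pl", "bl", "gl", "cl", "tr", "dr", "pr", "br", "cr", "gr", "tw", "dw",
-- 				"fl", "sl", "fr", "sw", "sp", "st", "sk", "th", "ch", "sm", "sn", "ph",
-- 				"spl", "spr", "str", "q", "r", "t", "y", "p", "s", "d", "f", "g", "h", "j", "k",
-- 				"l", "z", "x", "c", "v", "b", "n", "m", "scr", "w"]
--
-- 	i = 1
--
-- 	while(word[vidx[stress-1]+i : vidx[stress]] != ""):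
-- 		if word[vidx[stress-1]+i : vidx[stress]].lower() in onsets:
-- 			return word[:vidx[stress-1]+i ] + infix + word[vidx[stress-1]+i :]
-- 		else:
-- 			i+= 1
-- ===== SOURCE B (Python) =====
-- def split_onset(word, stress, vidx, infix):
-- 	onsets = {"sh", "pl", "bl", "gl", "cl", "tr", "dr", "pr", "br", "cr", "gr", "tw", "dw",
-- 				"fl", "sl", "fr", "sw", "sp", "st", "sk", "th", "ch", "sm", "sn", "ph",
-- 				"spl", "spr", "str", "q", "r", "t", "y", "p", "s", "d", "f", "g", "h", "j", "k",
-- 				"l", "z", "x", "c", "v", "b", "n", "m", "scr", "w"}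
--
-- 	# Resolve the region [vidx[stress-1]+1 : vidx[stress]] to concrete indices once.
-- 	start, end, _ = slice(vidx[stress - 1] + 1, vidx[stress]).indices(len(word))
--
-- 	# An onset is at most 3 characters, so only the last min(3, region length)
-- 	# tails of the region can match; check them longest-first.
-- 	for length in range(min(3, end - start), 0, -1):
-- 		cut = end - length
-- 		if word[cut:end].lower() in onsets:
-- 			return word[:cut] + infix + word[cut:]
-- 	return None
-- ===== Notes on version B (the rewrite author's own statement) =====
-- stated objective: alternative
-- what changed: A scans every suffix of the inter-vowel region one index at a time, testing each against a 50-element list; B resolves the slice bounds once (slice.indices) and checks only the at-most-3 candidate tails of the region against a set, since no onset is longer than 3 characters.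
import Mathlib
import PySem

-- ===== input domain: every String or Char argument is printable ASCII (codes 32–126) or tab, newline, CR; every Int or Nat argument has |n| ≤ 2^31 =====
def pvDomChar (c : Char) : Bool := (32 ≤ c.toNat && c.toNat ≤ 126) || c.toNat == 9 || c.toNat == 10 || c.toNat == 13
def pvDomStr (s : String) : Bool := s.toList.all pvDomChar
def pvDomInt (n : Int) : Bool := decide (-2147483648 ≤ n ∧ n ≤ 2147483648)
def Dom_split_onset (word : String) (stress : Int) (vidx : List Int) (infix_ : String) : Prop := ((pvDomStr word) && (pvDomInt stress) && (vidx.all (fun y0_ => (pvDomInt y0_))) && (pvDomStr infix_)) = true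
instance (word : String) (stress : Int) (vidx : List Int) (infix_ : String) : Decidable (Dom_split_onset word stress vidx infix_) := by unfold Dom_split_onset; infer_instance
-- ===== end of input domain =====

-- B resolves the region's slice indices once and checks only the at-most-3 candidate
-- tails against a set, instead of A's incremental suffix scan; return values agree.

-- ===== PORT A =====
def pvOnsetsA : List String := ["sh", "pl", "bl", "gl", "cl", "tr", "dr", "pr", "br", "cr", "gr", "tw", "dw",
  "fl", "sl", "fr", "sw", "sp", "st", "sk", "th", "ch", "sm", "sn", "ph",
  "spl", "spr", "str", "q", "r", "t", "y", "p", "s", "d", "f", "g", "h", "j", "k",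
  "l", "z", "x", "c", "v", "b", "n", "m", "scr", "w"]

-- (termination of A's while loop: its guard slice is empty once the raw start index
-- reaches max(stop, len(word)))
theorem pvSliceNeLt (word : String) (c b : Int)
    (h : PySem.Str.slice word (some c) (some b) ≠ "") :
    c < max b (word.toList.length : Int) := by
  by_contra hc
  push_neg at hc
  apply h
  have hlen : (PySem.List.slice word.toList (some c) (some b)).length = 0 := by
    rw [PySem.List.length_slice]
    have h1 : PySem.List.clampIdx word.toList.length c = word.toList.length := by
      unfold PySem.List.clampIdx; split_ifs <;> omega
    have h2 : PySem.List.clampIdx word.toList.length b ≤ word.toList.length :=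
      PySem.List.clampIdx_le _ _
    omega
  have hnil : PySem.List.slice word.toList (some c) (some b) = [] :=
    List.eq_nil_of_length_eq_zero hlen
  apply String.toList_inj.mp
  rw [PySem.Str.toList_slice, PySem.Chars.slice_eq_listSlice, hnil]
  rfl

-- A's while loop; the state is the counter i
def pvLoopA (word : String) (a b : Int) (infix_ : String) (i : Int) : Option String :=
  if h : PySem.Str.slice word (some (a + i)) (some b) ≠ "" then
    if PySem.Str.lower (PySem.Str.slice word (some (a + i)) (some b)) ∈ pvOnsetsA then
      some (PySem.Str.slice word none (some (a + i)) ++ infix_ ++ PySem.Str.slice word (some (a + i)) none)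
    else
      pvLoopA word a b infix_ (i + 1)
  else
    none
termination_by (max b (word.toList.length : Int) - (a + i)).toNat
decreasing_by
  have := pvSliceNeLt word (a + i) b h
  omega

def split_onset (word : String) (stress : Int) (vidx : List Int) (infix_ : String) : Option String :=
  pvLoopA word (PySem.List.pyGetD vidx (stress - 1) 0) (PySem.List.pyGetD vidx stress 0) infix_ 1

-- ===== PORT B =====
def pvOnsetsB : PySem.Set String := PySem.Set.ofList ["sh", "pl", "bl", "gl", "cl", "tr", "dr", "pr", "br", "cr", "gr", "tw", "dw",
  "fl", "sl", "fr", "sw", "sp", "st", "sk", "th", "ch", "sm", "sn", "ph",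
  "spl", "spr", "str", "q", "r", "t", "y", "p", "s", "d", "f", "g", "h", "j", "k",
  "l", "z", "x", "c", "v", "b", "n", "m", "scr", "w"]

-- Source B's descending for-loop over the candidate tail lengths L = min(3, e-start), …, 1
def pvLoopB (word : String) (e : Nat) (infix_ : String) : Nat → Option String
  | 0 => none
  | (L + 1) =>
    let cut : Nat := e - (L + 1)
    if PySem.Str.lower (PySem.Str.slice word (some (cut : Int)) (some (e : Int))) ∈ pvOnsetsB then
      some (PySem.Str.slice word none (some (cut : Int)) ++ infix_ ++ PySem.Str.slice word (some (cut : Int)) none)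
    else
      pvLoopB word e infix_ L

def split_onset_alt (word : String) (stress : Int) (vidx : List Int) (infix_ : String) : Option String :=
  -- slice(vidx[stress-1]+1, vidx[stress]).indices(len(word)) with step 1 resolves each
  -- bound exactly as PySem.List.clampIdx does (negative means from the end, then clamp to [0, len])
  let start : Nat := PySem.List.clampIdx word.toList.length (PySem.List.pyGetD vidx (stress - 1) 0 + 1)
  let e : Nat := PySem.List.clampIdx word.toList.length (PySem.List.pyGetD vidx stress 0)
  pvLoopB word e infix_ (min 3 (e - start))

-- ===== PRECONDITION & SPEC =====
-- Pre_ excludes exactly the inputs where A raises IndexError on vidx[stress-1] / vidx[stress]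
def Pre_split_onset (word : String) (stress : Int) (vidx : List Int) (infix_ : String) : Prop :=
  PySem.Raise.InRange vidx.length (stress - 1) ∧ PySem.Raise.InRange vidx.length stress
instance (word : String) (stress : Int) (vidx : List Int) (infix_ : String) : Decidable (Pre_split_onset word stress vidx infix_) := by unfold Pre_split_onset; infer_instance

def pvWitness_split_onset : String × Int × List Int × String := ("banana", 1, [1, 3], "bloody")

def Spec_split_onset (word : String) (stress : Int) (vidx : List Int) (infix_ : String) (out : Option String) : Prop := out = split_onset_alt word stress vidx infix_
instance (word : String) (stress : Int) (vidx : List Int) (infix_ : String) (out : Option String) : Decidable (Spec_split_onset word stress vidx infix_ out) := by unfold Spec_split_onset; infer_instance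

-- ===== CLAIM (what is proved, stated in full; the proofs are below) =====
def Claim_equal_split_onset : Prop := ∀ (word : String) (stress : Int) (vidx : List Int) (infix_ : String), Dom_split_onset word stress vidx infix_ → Pre_split_onset word stress vidx infix_ → Spec_split_onset word stress vidx infix_ (split_onset word stress vidx infix_)

-- ===== LEMMAS AND PROOFS =====

theorem pvClampIdem (n : Nat) (c : Int) :
    PySem.List.clampIdx n ((PySem.List.clampIdx n c : Nat) : Int) = PySem.List.clampIdx n c := by
  unfold PySem.List.clampIdx; split_ifs <;> omega

theorem pvClampLe (n : Nat) (c : Int) : PySem.List.clampIdx n c ≤ n := by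
  unfold PySem.List.clampIdx; split_ifs <;> omega

-- one raw step of A's scan moves the resolved start by 0 or 1, except at the -1 → 0
-- wrap-around (and there the resolved start sat at the very end of the word)
theorem pvClampStep (n : Nat) (c : Int) :
    PySem.List.clampIdx n (c + 1) = PySem.List.clampIdx n c ∨
    PySem.List.clampIdx n (c + 1) = PySem.List.clampIdx n c + 1 ∨
    (PySem.List.clampIdx n (c + 1) = 0 ∧ n ≤ PySem.List.clampIdx n c + 1) := by
  unfold PySem.List.clampIdx; split_ifs <;> omega

theorem pvOnsetsLen : ∀ s ∈ pvOnsetsA, 1 ≤ s.toList.length ∧ s.toList.length ≤ 3 := by decide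

-- the last character of every onset is itself an onset
theorem pvOnsetsClosed : ∀ s ∈ pvOnsetsA, String.ofList [s.toList.getLastD 'a'] ∈ pvOnsetsA := by decide

theorem pvMemB (s : String) : s ∈ pvOnsetsB ↔ s ∈ pvOnsetsA := by
  unfold pvOnsetsB pvOnsetsA; exact PySem.Set.mem_ofList _ _

theorem pvDropLast {α : Type} (l : List α) (d : α) (h : l ≠ []) :
    l.drop (l.length - 1) = [l.getLastD d] := by
  obtain ⟨ys, x, hl⟩ : ∃ ys x, l = ys ++ [x] :=
    ⟨l.dropLast, l.getLast h, (List.dropLast_append_getLast h).symm⟩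
  subst hl
  simp

theorem pvStrEmpty (s : String) : s = "" ↔ s.toList = [] := by
  rw [← String.toList_inj]; simp

theorem pvSliceList (word : String) (c b : Int) :
    (PySem.Str.slice word (some c) (some b)).toList =
      (word.toList.drop (PySem.List.clampIdx word.toList.length c)).take
        (PySem.List.clampIdx word.toList.length b - PySem.List.clampIdx word.toList.length c) := by
  simp only [PySem.Str.toList_slice, PySem.Chars.slice_eq_listSlice, PySem.List.slice]

theorem pvSliceEqNat (word : String) (c b : Int) :
    PySem.Str.slice word (some c) (some b) =
      PySem.Str.slice word (some ((PySem.List.clampIdx word.toList.length c : Nat) : Int))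
        (some ((PySem.List.clampIdx word.toList.length b : Nat) : Int)) := by
  rw [← String.toList_inj, pvSliceList, pvSliceList, pvClampIdem, pvClampIdem]

theorem pvSliceToList (word : String) (c : Int) :
    (PySem.Str.slice word none (some c)).toList =
      word.toList.take (PySem.List.clampIdx word.toList.length c) := by
  simp only [PySem.Str.toList_slice, PySem.Chars.slice_eq_listSlice, PySem.List.slice,
    List.drop_zero, Nat.sub_zero]

theorem pvSliceFromList (word : String) (c : Int) :
    (PySem.Str.slice word (some c) none).toList =
      word.toList.drop (PySem.List.clampIdx word.toList.length c) := by
  simp only [PySem.Str.toList_slice, PySem.Chars.slice_eq_listSlice, PySem.List.slice]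
  exact List.take_of_length_le (by simp)

-- inserting at the raw index c and at the resolved index clampIdx c builds the same string
theorem pvInsEqNat (word : String) (infix_ : String) (c : Int) :
    PySem.Str.slice word none (some c) ++ infix_ ++ PySem.Str.slice word (some c) none =
      PySem.Str.slice word none (some ((PySem.List.clampIdx word.toList.length c : Nat) : Int)) ++ infix_ ++
        PySem.Str.slice word (some ((PySem.List.clampIdx word.toList.length c : Nat) : Int)) none := by
  have h1 : PySem.Str.slice word none (some c) =
      PySem.Str.slice word none (some ((PySem.List.clampIdx word.toList.length c : Nat) : Int)) := by
    rw [← String.toList_inj, pvSliceToList, pvSliceToList, pvClampIdem]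
  have h2 : PySem.Str.slice word (some c) none =
      PySem.Str.slice word (some ((PySem.List.clampIdx word.toList.length c : Nat) : Int)) none := by
    rw [← String.toList_inj, pvSliceFromList, pvSliceFromList, pvClampIdem]
  rw [h1, h2]

theorem pvSliceEmptyIff (word : String) (c b : Int) :
    (PySem.Str.slice word (some c) (some b) = "") ↔
      PySem.List.clampIdx word.toList.length b - PySem.List.clampIdx word.toList.length c = 0 := by
  rw [pvStrEmpty, pvSliceList]
  constructor
  · intro h
    have := congrArg List.length h
    simp only [List.length_take, List.length_drop, List.length_nil] at this
    have := pvClampLe word.toList.length b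
    omega
  · intro h; rw [h]; simp

theorem pvLowerSliceLen (word : String) (c b : Int) :
    (PySem.Str.lower (PySem.Str.slice word (some c) (some b))).toList.length =
      PySem.List.clampIdx word.toList.length b - PySem.List.clampIdx word.toList.length c := by
  rw [PySem.Str.toList_lower, PySem.Chars.lower, List.length_map, pvSliceList]
  have hb := pvClampLe word.toList.length b
  simp only [List.length_take, List.length_drop]
  omega

-- the last character of any nonempty slice A tests is the last character of the region
theorem pvKey (word : String) (c b : Int)
    (hL0 : PySem.List.clampIdx word.toList.length b - PySem.List.clampIdx word.toList.length c ≠ 0) :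
    String.ofList
        [(PySem.Str.lower (PySem.Str.slice word (some c) (some b))).toList.getLastD 'a'] =
      PySem.Str.lower (PySem.Str.slice word
        (some ((PySem.List.clampIdx word.toList.length b - 1 : Nat) : Int))
        (some ((PySem.List.clampIdx word.toList.length b : Nat) : Int))) := by
  have hn := pvClampLe word.toList.length b
  have hc := pvClampLe word.toList.length c
  rw [← String.toList_inj, String.toList_ofList]
  have hlen := pvLowerSliceLen word c b
  have hne : (PySem.Str.lower (PySem.Str.slice word (some c) (some b))).toList ≠ [] := by
    intro h0; rw [h0] at hlen; simp only [List.length_nil] at hlen; omega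
  rw [← pvDropLast _ 'a' hne, hlen]
  rw [PySem.Str.toList_lower]
  rw [PySem.Chars.lower]
  rw [pvSliceList]
  rw [← List.map_drop]
  rw [List.drop_take]
  rw [List.drop_drop]
  rw [PySem.Str.toList_lower]
  rw [PySem.Chars.lower]
  rw [pvSliceList]
  rw [PySem.List.clampIdx_natCast, PySem.List.clampIdx_natCast]
  have h1 : PySem.List.clampIdx word.toList.length c +
      (PySem.List.clampIdx word.toList.length b - PySem.List.clampIdx word.toList.length c - 1) =
      min (PySem.List.clampIdx word.toList.length b - 1) word.toList.length := by omega
  have h2 : PySem.List.clampIdx word.toList.length b - PySem.List.clampIdx word.toList.length c -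
      (PySem.List.clampIdx word.toList.length b - PySem.List.clampIdx word.toList.length c - 1) =
      min (PySem.List.clampIdx word.toList.length b) word.toList.length -
        min (PySem.List.clampIdx word.toList.length b - 1) word.toList.length := by omega
  rw [h1, h2]

-- if the one-character tail of the region is not an onset, A's loop can never fire:
-- every slice A tests ends at the same resolved stop index, and every onset keeps its
-- last character an onset
theorem pvNoMatch (word : String) (b : Int) (infix_ : String)
    (hfail : PySem.Str.lower (PySem.Str.slice word
        (some ((PySem.List.clampIdx word.toList.length b - 1 : Nat) : Int))
        (some ((PySem.List.clampIdx word.toList.length b : Nat) : Int))) ∉ pvOnsetsA) :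
    ∀ (k : Nat) (a i : Int),
      (max b (word.toList.length : Int) - (a + i)).toNat ≤ k →
      pvLoopA word a b infix_ i = none := by
  intro k
  induction k with
  | zero =>
    intro a i hk
    rw [pvLoopA, dif_neg]
    intro hne
    have := pvSliceNeLt word (a + i) b hne
    omega
  | succ k ih =>
    intro a i hk
    rw [pvLoopA]
    by_cases hg : PySem.Str.slice word (some (a + i)) (some b) = ""
    · rw [dif_neg (by simpa using hg)]
    · rw [dif_pos hg]
      have hlt := pvSliceNeLt word (a + i) b hg
      rw [if_neg]
      · exact ih a (i + 1) (by omega)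
      · intro hmem
        have hL0 : PySem.List.clampIdx word.toList.length b -
            PySem.List.clampIdx word.toList.length (a + i) ≠ 0 :=
          fun h0 => hg ((pvSliceEmptyIff word (a + i) b).mpr h0)
        exact hfail (pvKey word (a + i) b hL0 ▸ pvOnsetsClosed _ hmem)

theorem pvEmptyCase (word : String) (b : Int) (infix_ : String) (c : Int)
    (hemp : PySem.Str.slice word (some c) (some b) = "") :
    (none : Option String) = pvLoopB word (PySem.List.clampIdx word.toList.length b) infix_
      (min 3 (PySem.List.clampIdx word.toList.length b - PySem.List.clampIdx word.toList.length c)) := by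
  rw [(pvSliceEmptyIff word c b).mp hemp]
  rfl

-- the heart of the equivalence: from any raw position, A's remaining scan returns what
-- B's bounded tail loop returns for the resolved remaining region
theorem pvMainAux (word : String) (b : Int) (infix_ : String) :
    ∀ (k : Nat) (a i : Int), (max b (word.toList.length : Int) - (a + i)).toNat ≤ k →
    pvLoopA word a b infix_ i =
      pvLoopB word (PySem.List.clampIdx word.toList.length b) infix_
        (min 3 (PySem.List.clampIdx word.toList.length b - PySem.List.clampIdx word.toList.length (a + i))) := by
  intro k
  induction k with
  | zero =>
    intro a i hk
    have hemp : PySem.Str.slice word (some (a + i)) (some b) = "" := by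
      by_contra hne
      have := pvSliceNeLt word (a + i) b hne
      omega
    rw [pvLoopA, dif_neg (by simpa using hemp)]
    exact pvEmptyCase word b infix_ (a + i) hemp
  | succ k ih =>
    intro a i hk
    by_cases hg : PySem.Str.slice word (some (a + i)) (some b) = ""
    · rw [pvLoopA, dif_neg (by simpa using hg)]
      exact pvEmptyCase word b infix_ (a + i) hg
    · rw [pvLoopA, dif_pos hg]
      have hlt := pvSliceNeLt word (a + i) b hg
      have hL0 : PySem.List.clampIdx word.toList.length b -
          PySem.List.clampIdx word.toList.length (a + i) ≠ 0 :=
        fun h0 => hg ((pvSliceEmptyIff word (a + i) b).mpr h0)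
      have hn := pvClampLe word.toList.length b
      have hcle := pvClampLe word.toList.length (a + i)
      by_cases hm : PySem.Str.lower (PySem.Str.slice word (some (a + i)) (some b)) ∈ pvOnsetsA
      · rw [if_pos hm]
        have hlen := pvLowerSliceLen word (a + i) b
        obtain ⟨h1, h3⟩ := pvOnsetsLen _ hm
        rw [hlen] at h1 h3
        rw [show min 3 (PySem.List.clampIdx word.toList.length b -
            PySem.List.clampIdx word.toList.length (a + i)) =
            PySem.List.clampIdx word.toList.length b -
              PySem.List.clampIdx word.toList.length (a + i) from by omega]
        obtain ⟨L', hL'⟩ : ∃ L', PySem.List.clampIdx word.toList.length b -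
            PySem.List.clampIdx word.toList.length (a + i) = L' + 1 :=
          ⟨PySem.List.clampIdx word.toList.length b -
            PySem.List.clampIdx word.toList.length (a + i) - 1, by omega⟩
        rw [hL']
        have hcut : PySem.List.clampIdx word.toList.length b - (L' + 1) =
            PySem.List.clampIdx word.toList.length (a + i) := by omega
        have hmB : PySem.Str.lower (PySem.Str.slice word
            (some ((PySem.List.clampIdx word.toList.length (a + i) : Nat) : Int))
            (some ((PySem.List.clampIdx word.toList.length b : Nat) : Int))) ∈ pvOnsetsB :=
          (pvMemB _).mpr (pvSliceEqNat word (a + i) b ▸ hm)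
        simp only [pvLoopB, hcut]
        rw [if_pos hmB]
        exact congrArg some (pvInsEqNat word infix_ (a + i))
      · rw [if_neg hm]
        have hih := ih a (i + 1) (by omega)
        rw [show a + (i + 1) = (a + i) + 1 from by ring] at hih
        have hmB : PySem.Str.lower (PySem.Str.slice word
            (some ((PySem.List.clampIdx word.toList.length (a + i) : Nat) : Int))
            (some ((PySem.List.clampIdx word.toList.length b : Nat) : Int))) ∉ pvOnsetsB :=
          fun hb => hm (pvSliceEqNat word (a + i) b ▸ (pvMemB _).mp hb)
        rcases pvClampStep word.toList.length (a + i) with hs | hs | ⟨hs, hnle⟩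
        · rw [hih, hs]
        · rw [hih, hs]
          by_cases hbig : 4 ≤ PySem.List.clampIdx word.toList.length b -
              PySem.List.clampIdx word.toList.length (a + i)
          · rw [show min 3 (PySem.List.clampIdx word.toList.length b -
                (PySem.List.clampIdx word.toList.length (a + i) + 1)) = 3 from by omega,
              show min 3 (PySem.List.clampIdx word.toList.length b -
                PySem.List.clampIdx word.toList.length (a + i)) = 3 from by omega]
          · obtain ⟨L', hL'⟩ : ∃ L', PySem.List.clampIdx word.toList.length b -
                PySem.List.clampIdx word.toList.length (a + i) = L' + 1 :=
              ⟨PySem.List.clampIdx word.toList.length b -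
            PySem.List.clampIdx word.toList.length (a + i) - 1, by omega⟩
            rw [show min 3 (PySem.List.clampIdx word.toList.length b -
                (PySem.List.clampIdx word.toList.length (a + i) + 1)) = L' from by omega,
              show min 3 (PySem.List.clampIdx word.toList.length b -
                PySem.List.clampIdx word.toList.length (a + i)) = L' + 1 from by omega]
            have hcut : PySem.List.clampIdx word.toList.length b - (L' + 1) =
                PySem.List.clampIdx word.toList.length (a + i) := by omega
            simp only [pvLoopB, hcut]
            rw [if_neg hmB]
        · -- wrap-around step: the failing test was the one-character tail of the region,
          -- so nothing later can match either
          have hfail' : PySem.Str.lower (PySem.Str.slice word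
              (some ((PySem.List.clampIdx word.toList.length b - 1 : Nat) : Int))
              (some ((PySem.List.clampIdx word.toList.length b : Nat) : Int))) ∉ pvOnsetsA := by
            intro hx
            apply hm
            rw [pvSliceEqNat word (a + i) b]
            rw [show PySem.List.clampIdx word.toList.length (a + i) =
              PySem.List.clampIdx word.toList.length b - 1 from by omega]
            exact hx
          have hnone := pvNoMatch word b infix_ hfail' k a (i + 1) (by omega)
          rw [hnone]
          rw [show min 3 (PySem.List.clampIdx word.toList.length b -
              PySem.List.clampIdx word.toList.length (a + i)) = 0 + 1 from by omega]
          have hcut : PySem.List.clampIdx word.toList.length b - (0 + 1) =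
              PySem.List.clampIdx word.toList.length (a + i) := by omega
          simp only [pvLoopB, hcut]
          rw [if_neg hmB]

theorem pvMain (word : String) (b : Int) (infix_ : String) (a i : Int) :
    pvLoopA word a b infix_ i =
      pvLoopB word (PySem.List.clampIdx word.toList.length b) infix_
        (min 3 (PySem.List.clampIdx word.toList.length b - PySem.List.clampIdx word.toList.length (a + i))) :=
  pvMainAux word b infix_ _ a i le_rfl

-- ===== VERDICT (by name: the statement is the Claim_ definition above) =====
theorem split_onset_spec : Claim_equal_split_onset := by
  intro word stress vidx infix_ _hdom _hpre
  unfold Spec_split_onset split_onset split_onset_alt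
  exact pvMain word _ infix_ _ 1
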